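-- pv_equiv track=rewrite | github.com/rain-zhao/leetcode | py/LCP08.py | getTriggerTime2
-- ===== SOURCE A (Python) =====
-- from typing import List
--
-- def getTriggerTime2(increase: List[List[int]], requirements: List[List[int]]) -> List[int]:
--     res = [-1] * len(requirements)
--     total = [(0, 0, 0)]
--     c_sort = []
--     r_sort = []
--     h_sort = []
--     sub_res = [[-1, -1, -1] for _ in range(len(requirements))]
--     for i in increase:
--         cur = (total[-1][0]+i[0], total[-1][1]+i[1], total[-1][2]+i[2])
--         total.append(cur)
--     for idx, j in enumerate(requirements):
--         c_sort.append((j[0], idx))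
--         r_sort.append((j[1], idx))
--         h_sort.append((j[2], idx))
--     c_sort.sort()
--     r_sort.sort()
--     h_sort.sort()
--     pc = pr = ph = 0
--     for i in range(len(total)):
--         while pc < len(requirements) and c_sort[pc][0] <= total[i][0]:
--             sub_res[c_sort[pc][1]][0] = i
--             pc += 1
--         while pr < len(requirements) and r_sort[pr][0] <= total[i][1]:
--             sub_res[r_sort[pr][1]][1] = i
--             pr += 1
--         while ph < len(requirements) and h_sort[ph][0] <= total[i][2]:
--             sub_res[h_sort[ph][1]][2] = i
--             ph += 1
--     for i in range(len(requirements)):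
--         if sub_res[i][0] == -1 or sub_res[i][1] == -1 or sub_res[i][2] == -1:
--             continue
--         res[i] = max(sub_res[i][0], sub_res[i][1], sub_res[i][2])
--
--     return res
-- ===== SOURCE B (Python) =====
-- from typing import List
--
-- def _first_day(total, k, t):
--     for i, v in enumerate(total):
--         if v[k] >= t:
--             return i
--     return -1
--
-- def getTriggerTime2(increase: List[List[int]], requirements: List[List[int]]) -> List[int]:
--     a = b = c = 0
--     total = [(0, 0, 0)]
--     for inc in increase:
--         a += inc[0]; b += inc[1]; c += inc[2]
--         total.append((a, b, c))
--     res = []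
--     for req in requirements:
--         d0 = _first_day(total, 0, req[0])
--         d1 = _first_day(total, 1, req[1])
--         d2 = _first_day(total, 2, req[2])
--         res.append(-1 if -1 in (d0, d1, d2) else max(d0, d1, d2))
--     return res
-- ===== Notes on version B (the rewrite author's own statement) =====
-- stated objective: simpler
-- what changed: Replaces A's three sorted threshold lists with a global three-pointer sweep over the prefix-sum list by a direct per-requirement linear scan that finds, for each coordinate independently, the first day its threshold is met.
import Mathlib
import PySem

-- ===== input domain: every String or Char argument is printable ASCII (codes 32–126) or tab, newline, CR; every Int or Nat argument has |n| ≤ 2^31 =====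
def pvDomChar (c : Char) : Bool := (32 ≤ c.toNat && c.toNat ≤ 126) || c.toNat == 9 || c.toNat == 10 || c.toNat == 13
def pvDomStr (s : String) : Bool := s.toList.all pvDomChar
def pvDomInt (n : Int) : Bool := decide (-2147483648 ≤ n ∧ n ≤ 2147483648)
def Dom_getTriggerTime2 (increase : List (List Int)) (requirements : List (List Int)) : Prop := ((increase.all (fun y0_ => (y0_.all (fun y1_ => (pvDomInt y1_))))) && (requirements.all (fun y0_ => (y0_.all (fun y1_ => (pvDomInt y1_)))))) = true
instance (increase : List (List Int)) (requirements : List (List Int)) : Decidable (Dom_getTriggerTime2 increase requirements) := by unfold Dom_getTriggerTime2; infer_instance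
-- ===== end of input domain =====

-- B replaces A's global sort + three-pointer sweep by a per-requirement linear scan (simpler, not faster).


-- ===== PORT A =====
-- row[k]; in range whenever Pre_ holds (rows have length ≥ 3 and k ∈ {0,1,2})
def pvG (l : List Int) (k : Int) : Int := (PySem.List.pyGet? l k).getD 0

-- total.append((total[-1][0]+i[0], total[-1][1]+i[1], total[-1][2]+i[2]))
def pvTotalA (increase : List (List Int)) : List (Int × Int × Int) :=
  increase.foldl (fun total i =>
    let p := (PySem.List.pyGet? total (-1)).getD (0, 0, 0)
    total ++ [(p.1 + pvG i 0, p.2.1 + pvG i 1, p.2.2 + pvG i 2)]) [(0, 0, 0)]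

-- the inner 'while pc < len(requirements) and c_sort[pc][0] <= total[i][0]' loops,
-- with the pointer represented as the remaining suffix of the sorted list
def pvConsumeC (v : Int) : List (Int × Int) → List (Int × Int × Int) → Int → List (Int × Int) × List (Int × Int × Int)
  | [], sub, _ => ([], sub)
  | (t, idx) :: rest, sub, day =>
    if t ≤ v then
      let old := sub.getD idx.toNat (-1, -1, -1)
      pvConsumeC v rest (sub.set idx.toNat (day, old.2.1, old.2.2)) day
    else ((t, idx) :: rest, sub)

def pvConsumeR (v : Int) : List (Int × Int) → List (Int × Int × Int) → Int → List (Int × Int) × List (Int × Int × Int)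
  | [], sub, _ => ([], sub)
  | (t, idx) :: rest, sub, day =>
    if t ≤ v then
      let old := sub.getD idx.toNat (-1, -1, -1)
      pvConsumeR v rest (sub.set idx.toNat (old.1, day, old.2.2)) day
    else ((t, idx) :: rest, sub)

def pvConsumeH (v : Int) : List (Int × Int) → List (Int × Int × Int) → Int → List (Int × Int) × List (Int × Int × Int)
  | [], sub, _ => ([], sub)
  | (t, idx) :: rest, sub, day =>
    if t ≤ v then
      let old := sub.getD idx.toNat (-1, -1, -1)
      pvConsumeH v rest (sub.set idx.toNat (old.1, old.2.1, day)) day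
    else ((t, idx) :: rest, sub)

-- for i in range(len(total)): the three while loops
def pvSweep : List (Int × Int × Int) → Int → List (Int × Int) → List (Int × Int) → List (Int × Int) → List (Int × Int × Int) → List (Int × Int × Int)
  | [], _, _, _, _, sub => sub
  | v :: rest, day, cs, rs, hs, sub =>
    let p1 := pvConsumeC v.1 cs sub day
    let p2 := pvConsumeR v.2.1 rs p1.2 day
    let p3 := pvConsumeH v.2.2 hs p2.2 day
    pvSweep rest (day + 1) p1.1 p2.1 p3.1 p3.2

def getTriggerTime2 (increase : List (List Int)) (requirements : List (List Int)) : List Int :=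
  let total := pvTotalA increase
  let csort := PySem.List.sorted ((PySem.List.enumerate requirements 0).map (fun p => (pvG p.2 0, p.1))) (·.1) false
  let rsort := PySem.List.sorted ((PySem.List.enumerate requirements 0).map (fun p => (pvG p.2 1, p.1))) (·.1) false
  let hsort := PySem.List.sorted ((PySem.List.enumerate requirements 0).map (fun p => (pvG p.2 2, p.1))) (·.1) false
  let sub := pvSweep total 0 csort rsort hsort (List.replicate requirements.length (-1, -1, -1))
  (List.range requirements.length).map (fun i =>
    let s := sub.getD i (-1, -1, -1)
    if s.1 = -1 ∨ s.2.1 = -1 ∨ s.2.2 = -1 then -1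
    else max s.1 (max s.2.1 s.2.2))

-- ===== PORT B =====
-- running sums a, b, c; total = [(0,0,0)] ++ these prefix sums
def pvPrefixB : List (List Int) → Int → Int → Int → List (Int × Int × Int)
  | [], _, _, _ => []
  | inc :: rest, a, b, c =>
    let a' := a + pvG inc 0
    let b' := b + pvG inc 1
    let c' := c + pvG inc 2
    (a', b', c') :: pvPrefixB rest a' b' c'

-- _first_day: first index i with total[i][k] >= t, else -1
def pvFirst (l : List (Int × Int × Int)) (f : (Int × Int × Int) → Int) (t : Int) (i : Int) : Int :=
  match l with
  | [] => -1
  | v :: rest => if t ≤ f v then i else pvFirst rest f t (i + 1)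

def getTriggerTime2_alt (increase : List (List Int)) (requirements : List (List Int)) : List Int :=
  let total := (0, 0, 0) :: pvPrefixB increase 0 0 0
  requirements.map (fun req =>
    let d0 := pvFirst total (·.1) (pvG req 0) 0
    let d1 := pvFirst total (·.2.1) (pvG req 1) 0
    let d2 := pvFirst total (·.2.2) (pvG req 2) 0
    if d0 = -1 ∨ d1 = -1 ∨ d2 = -1 then -1 else max d0 (max d1 d2))

-- ===== PRECONDITION & SPEC =====
-- Pre_ excludes exactly the inputs where the Python A raises IndexError: a row of
-- increase or requirements with fewer than 3 entries (both Pythons index [0..2]).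
def Pre_getTriggerTime2 (increase : List (List Int)) (requirements : List (List Int)) : Prop :=
  (∀ r ∈ increase, 3 ≤ r.length) ∧ (∀ r ∈ requirements, 3 ≤ r.length)
instance (increase : List (List Int)) (requirements : List (List Int)) : Decidable (Pre_getTriggerTime2 increase requirements) := by unfold Pre_getTriggerTime2; infer_instance

def pvWitness_getTriggerTime2 : List (List Int) × List (List Int) :=
  ([[1, 2, 3], [0, -1, 4]], [[1, 1, 1], [3, 0, 7], [0, 0, 0]])

def Spec_getTriggerTime2 (increase : List (List Int)) (requirements : List (List Int)) (out : List Int) : Prop := out = getTriggerTime2_alt increase requirements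
instance (increase : List (List Int)) (requirements : List (List Int)) (out : List Int) : Decidable (Spec_getTriggerTime2 increase requirements out) := by unfold Spec_getTriggerTime2; infer_instance

-- ===== CLAIM (what is proved, stated in full; the proofs are below) =====
def Claim_equal_getTriggerTime2 : Prop := ∀ (increase : List (List Int)) (requirements : List (List Int)), Dom_getTriggerTime2 increase requirements → Pre_getTriggerTime2 increase requirements → Spec_getTriggerTime2 increase requirements (getTriggerTime2 increase requirements)

-- ===== LEMMAS AND PROOFS =====

-- single-coordinate models of the while loop / day loop, used only in the proofs
def pvDropLe (v : Int) : List (Int × Int) → List (Int × Int)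
  | [] => []
  | (t, idx) :: rest => if t ≤ v then pvDropLe v rest else (t, idx) :: rest

def pvConsume1 (v : Int) : List (Int × Int) → List Int → Int → List (Int × Int) × List Int
  | [], sub, _ => ([], sub)
  | (t, idx) :: rest, sub, day =>
    if t ≤ v then pvConsume1 v rest (sub.set idx.toNat day) day
    else ((t, idx) :: rest, sub)

def pvSweep1 : List Int → Int → List (Int × Int) → List Int → List Int
  | [], _, _, sub => sub
  | v :: rest, day, rem, sub =>
    pvSweep1 rest (day + 1) (pvConsume1 v rem sub day).1 (pvConsume1 v rem sub day).2

def pvFirstI : List Int → Int → Int → Int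
  | [], _, _ => -1
  | v :: rest, t, i => if t ≤ v then i else pvFirstI rest t (i + 1)

theorem pvFirst_map (l : List (Int × Int × Int)) (f : (Int × Int × Int) → Int) (t i : Int) :
    pvFirst l f t i = pvFirstI (l.map f) t i := by
  induction l generalizing i with
  | nil => rfl
  | cons v rest ih => simp [pvFirst, pvFirstI, ih]

theorem pvTotalA_aux (inc : List (List Int)) : ∀ (pre : List (Int × Int × Int)) (p : Int × Int × Int),
    List.foldl (fun total i =>
      let q := (PySem.List.pyGet? total (-1)).getD (0, 0, 0)
      total ++ [(q.1 + pvG i 0, q.2.1 + pvG i 1, q.2.2 + pvG i 2)]) (pre ++ [p]) inc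
    = (pre ++ [p]) ++ pvPrefixB inc p.1 p.2.1 p.2.2 := by
  induction inc with
  | nil => intro pre p; simp [pvPrefixB]
  | cons i rest ih =>
    intro pre p
    simp only [List.foldl_cons, PySem.List.pyGet?_neg_one_append_singleton, Option.getD_some, pvPrefixB]
    have h := ih (pre ++ [p]) (p.1 + pvG i 0, p.2.1 + pvG i 1, p.2.2 + pvG i 2)
    simp only [List.append_assoc] at h ⊢
    rw [h]
    simp

theorem pvTotalA_eq (increase : List (List Int)) :
    pvTotalA increase = (0, 0, 0) :: pvPrefixB increase 0 0 0 := by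
  have := pvTotalA_aux increase [] (0, 0, 0)
  simpa [pvTotalA] using this

-- pvDropLe facts
theorem pvDropLe_sublist (v : Int) (rem : List (Int × Int)) : (pvDropLe v rem).Sublist rem := by
  induction rem with
  | nil => simp [pvDropLe]
  | cons q rest ih =>
    obtain ⟨t, idx⟩ := q
    by_cases h : t ≤ v
    · simp only [pvDropLe, if_pos h]; exact ih.trans (List.sublist_cons_self _ _)
    · simp [pvDropLe, if_neg h]

theorem pvDropLe_subset (v : Int) (rem : List (Int × Int)) : ∀ q ∈ pvDropLe v rem, q ∈ rem :=
  fun _ h => (pvDropLe_sublist v rem).subset h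

theorem pvDropLe_gt (v : Int) (rem : List (Int × Int))
    (hsort : rem.Pairwise (fun a b => a.1 ≤ b.1)) : ∀ q ∈ pvDropLe v rem, v < q.1 := by
  induction rem with
  | nil => simp [pvDropLe]
  | cons q rest ih =>
    obtain ⟨t, idx⟩ := q
    rw [List.pairwise_cons] at hsort
    by_cases h : t ≤ v
    · simp only [pvDropLe, if_pos h]; exact ih hsort.2
    · simp only [pvDropLe, if_neg h]
      intro r hr
      rcases List.mem_cons.mp hr with hr | hr
      · subst hr; omega
      · have := hsort.1 r hr; omega

theorem pvDropLe_mem_of_gt (v : Int) (rem : List (Int × Int)) (p : Int × Int)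
    (hp : p ∈ rem) (hgt : v < p.1) : p ∈ pvDropLe v rem := by
  induction rem with
  | nil => simp at hp
  | cons q rest ih =>
    obtain ⟨t, idx⟩ := q
    rcases List.mem_cons.mp hp with hp | hp
    · subst hp
      have h : ¬ t ≤ v := by simpa using hgt
      simp [pvDropLe, if_neg h]
    · by_cases h : t ≤ v
      · simp only [pvDropLe, if_pos h]; exact ih hp
      · simp only [pvDropLe, if_neg h]; exact List.mem_cons_of_mem _ hp

-- pvConsume1 facts
theorem pvConsume1_fst (v : Int) (rem : List (Int × Int)) (sub : List Int) (day : Int) :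
    (pvConsume1 v rem sub day).1 = pvDropLe v rem := by
  induction rem generalizing sub with
  | nil => rfl
  | cons q rest ih =>
    obtain ⟨t, idx⟩ := q
    by_cases h : t ≤ v
    · simp [pvConsume1, pvDropLe, if_pos h, ih]
    · simp [pvConsume1, pvDropLe, if_neg h]

theorem pvConsume1_length (v : Int) (rem : List (Int × Int)) (sub : List Int) (day : Int) :
    (pvConsume1 v rem sub day).2.length = sub.length := by
  induction rem generalizing sub with
  | nil => rfl
  | cons q rest ih =>
    obtain ⟨t, idx⟩ := q
    by_cases h : t ≤ v
    · simp [pvConsume1, if_pos h, ih]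
    · simp [pvConsume1, if_neg h]

theorem pvConsume1_stable (v : Int) (rem : List (Int × Int)) (day : Int) (j : Nat) :
    ∀ (sub : List Int), (∀ q ∈ rem, q.2.toNat ≠ j) →
    (pvConsume1 v rem sub day).2[j]? = sub[j]? := by
  induction rem with
  | nil => intro sub _; rfl
  | cons q rest ih =>
    intro sub hj
    obtain ⟨t, idx⟩ := q
    by_cases h : t ≤ v
    · simp only [pvConsume1, if_pos h]
      rw [ih _ (fun r hr => hj r (List.mem_cons_of_mem _ hr))]
      rw [List.getElem?_set_ne (hj (t, idx) List.mem_cons_self)]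
    · simp [pvConsume1, if_neg h]

theorem pvConsume1_get_of_le (v : Int) (rem : List (Int × Int)) (day : Int) (p : Int × Int) :
    ∀ (sub : List Int),
    rem.Pairwise (fun a b => a.1 ≤ b.1) → (rem.map (·.2)).Nodup →
    (∀ q ∈ rem, q.2.toNat < sub.length) → (∀ q ∈ rem, 0 ≤ q.2) →
    p ∈ rem → p.1 ≤ v →
    (pvConsume1 v rem sub day).2[p.2.toNat]? = some day := by
  induction rem with
  | nil => intro sub _ _ _ _ hp _; simp at hp
  | cons q rest ih =>
    intro sub hsort hnodup hrange hnn hp hle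
    obtain ⟨t, idx⟩ := q
    rw [List.pairwise_cons] at hsort
    by_cases h : t ≤ v
    · simp only [pvConsume1, if_pos h]
      rcases List.mem_cons.mp hp with hp | hp
      · subst hp
        rw [pvConsume1_stable]
        · rw [List.getElem?_set_self]
          have := hrange (t, idx) List.mem_cons_self
          simp at this ⊢
          omega
        · intro r hr heq
          rw [List.map_cons, List.nodup_cons] at hnodup
          have hne : r.2 ≠ idx := fun h2 => hnodup.1 (by
            have := List.mem_map_of_mem (f := fun x => x.2) hr
            simpa [h2] using this)
          have h1 := hnn r (List.mem_cons_of_mem _ hr)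
          have h2 := hnn (t, idx) List.mem_cons_self
          simp at h1 h2 ⊢
          omega
      · exact ih _ hsort.2
          (by simpa using (List.nodup_cons.mp (by simpa using hnodup)).2)
          (fun q hq => by rw [List.length_set]; exact hrange q (List.mem_cons_of_mem _ hq))
          (fun q hq => hnn q (List.mem_cons_of_mem _ hq)) hp hle
    · exfalso
      rcases List.mem_cons.mp hp with hp | hp
      · subst hp; exact h hle
      · have := hsort.1 p hp; omega

theorem pvConsume1_get_of_gt (v : Int) (rem : List (Int × Int)) (day : Int) (p : Int × Int) :
    ∀ (sub : List Int),
    (rem.map (·.2)).Nodup → (∀ q ∈ rem, 0 ≤ q.2) →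
    p ∈ rem → v < p.1 →
    (pvConsume1 v rem sub day).2[p.2.toNat]? = sub[p.2.toNat]? := by
  induction rem with
  | nil => intro sub _ _ hp _; simp at hp
  | cons q rest ih =>
    intro sub hnodup hnn hp hgt
    obtain ⟨t, idx⟩ := q
    by_cases h : t ≤ v
    · simp only [pvConsume1, if_pos h]
      have hp' : p ∈ rest := by
        rcases List.mem_cons.mp hp with hp | hp
        · exfalso; subst hp; simp at hgt; omega
        · exact hp
      rw [List.map_cons, List.nodup_cons] at hnodup
      rw [ih _ hnodup.2 (fun q hq => hnn q (List.mem_cons_of_mem _ hq)) hp' hgt]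
      have hne : p.2 ≠ idx := fun h2 => hnodup.1 (by
        have := List.mem_map_of_mem (f := fun x => x.2) hp'
        simpa [h2] using this)
      have h1 := hnn p (List.mem_cons_of_mem _ hp')
      have h2 := hnn (t, idx) List.mem_cons_self
      rw [List.getElem?_set_ne]
      simp at h2
      omega
    · simp [pvConsume1, if_neg h]

theorem pvSweep1_stable (tot : List Int) (j : Nat) :
    ∀ (day : Int) (rem : List (Int × Int)) (sub : List Int),
    (∀ q ∈ rem, q.2.toNat ≠ j) → (pvSweep1 tot day rem sub)[j]? = sub[j]? := by
  induction tot with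
  | nil => intro day rem sub _; rfl
  | cons v rest ih =>
    intro day rem sub hj
    simp only [pvSweep1, pvConsume1_fst]
    rw [ih _ _ _ (fun q hq => hj q (pvDropLe_subset v rem q hq))]
    exact pvConsume1_stable v rem day j sub hj

theorem pvSweep1_spec (tot : List Int) :
    ∀ (day : Int) (rem : List (Int × Int)) (sub : List Int),
    0 ≤ day →
    rem.Pairwise (fun a b => a.1 ≤ b.1) → (rem.map (·.2)).Nodup →
    (∀ q ∈ rem, q.2.toNat < sub.length) → (∀ q ∈ rem, 0 ≤ q.2) →
    ∀ p ∈ rem, (pvSweep1 tot day rem sub)[p.2.toNat]? =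
      if pvFirstI tot p.1 day = -1 then sub[p.2.toNat]? else some (pvFirstI tot p.1 day) := by
  induction tot with
  | nil =>
    intro day rem sub _ _ _ _ _ p _
    simp [pvSweep1, pvFirstI]
  | cons v rest ih =>
    intro day rem sub hday hsort hnodup hrange hnn p hp
    simp only [pvSweep1, pvConsume1_fst]
    by_cases hle : p.1 ≤ v
    · have hfi : pvFirstI (v :: rest) p.1 day = day := by simp [pvFirstI, hle]
      rw [hfi, if_neg (by omega)]
      rw [pvSweep1_stable]
      · exact pvConsume1_get_of_le v rem day p sub hsort hnodup hrange hnn hp hle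
      · intro q hq heq
        have hqrem := pvDropLe_subset v rem q hq
        have hgt := pvDropLe_gt v rem hsort q hq
        have hne : q ≠ p := by intro h; subst h; omega
        have : q.2 ≠ p.2 := fun h2 =>
          hne (List.inj_on_of_nodup_map hnodup hqrem hp h2)
        have h1 := hnn q hqrem
        have h2 := hnn p hp
        omega
    · have hfi : pvFirstI (v :: rest) p.1 day = pvFirstI rest p.1 (day + 1) := by
        simp [pvFirstI, hle]
      rw [hfi]
      have hmem' : p ∈ pvDropLe v rem := pvDropLe_mem_of_gt v rem p hp (by omega)
      have hsub' : (pvConsume1 v rem sub day).2[p.2.toNat]? = sub[p.2.toNat]? :=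
        pvConsume1_get_of_gt v rem day p sub hnodup hnn hp (by omega)
      rw [ih (day + 1) (pvDropLe v rem) _ (by omega)
        (hsort.sublist (pvDropLe_sublist v rem))
        ((List.Sublist.map (·.2) (pvDropLe_sublist v rem)).nodup hnodup)
        (fun q hq => by rw [pvConsume1_length]; exact hrange q (pvDropLe_subset v rem q hq))
        (fun q hq => hnn q (pvDropLe_subset v rem q hq)) p hmem', hsub']

theorem pvConsumeC_fst (v : Int) (rem : List (Int × Int)) (day : Int) :
    ∀ (sub : List (Int × Int × Int)), (pvConsumeC v rem sub day).1 = pvDropLe v rem := by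
  induction rem with
  | nil => intro sub; rfl
  | cons q rest ih =>
    intro sub
    obtain ⟨t, idx⟩ := q
    by_cases h : t ≤ v
    · simp only [pvConsumeC, pvDropLe, if_pos h]; exact ih _
    · simp [pvConsumeC, pvDropLe, if_neg h]

theorem pvConsumeC_length (v : Int) (rem : List (Int × Int)) (day : Int) :
    ∀ (sub : List (Int × Int × Int)), (pvConsumeC v rem sub day).2.length = sub.length := by
  induction rem with
  | nil => intro sub; rfl
  | cons q rest ih =>
    intro sub
    obtain ⟨t, idx⟩ := q
    by_cases h : t ≤ v
    · simp only [pvConsumeC, if_pos h]; rw [ih _, List.length_set]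
    · simp [pvConsumeC, if_neg h]

theorem pvConsumeC_mapC (v : Int) (rem : List (Int × Int)) (day : Int) :
    ∀ (sub : List (Int × Int × Int)),
    (pvConsumeC v rem sub day).2.map (fun s => s.1) = (pvConsume1 v rem (sub.map (fun s => s.1)) day).2 := by
  induction rem with
  | nil => intro sub; rfl
  | cons q rest ih =>
    intro sub
    obtain ⟨t, idx⟩ := q
    by_cases h : t ≤ v
    · simp only [pvConsumeC, pvConsume1, if_pos h]
      rw [ih _, List.map_set]
    · simp [pvConsumeC, pvConsume1, if_neg h]

theorem pvConsumeC_mapR (v : Int) (rem : List (Int × Int)) (day : Int) :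
    ∀ (sub : List (Int × Int × Int)), (∀ q ∈ rem, q.2.toNat < sub.length) →
    (pvConsumeC v rem sub day).2.map (fun s => s.2.1) = sub.map (fun s => s.2.1) := by
  induction rem with
  | nil => intro sub _; rfl
  | cons q rest ih =>
    intro sub hr
    obtain ⟨t, idx⟩ := q
    by_cases h : t ≤ v
    · simp only [pvConsumeC, if_pos h]
      rw [ih _ (fun q hq => by rw [List.length_set]; exact hr q (List.mem_cons_of_mem _ hq))]
      have hlt : idx.toNat < sub.length := hr (t, idx) List.mem_cons_self
      rw [List.getD_eq_getElem sub _ hlt, List.map_set]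
      have hlt' : idx.toNat < (List.map (fun s => s.2.1) sub).length := by simp [hlt]
      have hx : (day, sub[idx.toNat].2.1, sub[idx.toNat].2.2).2.1
          = (List.map (fun s => s.2.1) sub)[idx.toNat]'hlt' := by simp
      rw [hx, List.set_getElem_self]
    · simp [pvConsumeC, if_neg h]

theorem pvConsumeC_mapH (v : Int) (rem : List (Int × Int)) (day : Int) :
    ∀ (sub : List (Int × Int × Int)), (∀ q ∈ rem, q.2.toNat < sub.length) →
    (pvConsumeC v rem sub day).2.map (fun s => s.2.2) = sub.map (fun s => s.2.2) := by
  induction rem with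
  | nil => intro sub _; rfl
  | cons q rest ih =>
    intro sub hr
    obtain ⟨t, idx⟩ := q
    by_cases h : t ≤ v
    · simp only [pvConsumeC, if_pos h]
      rw [ih _ (fun q hq => by rw [List.length_set]; exact hr q (List.mem_cons_of_mem _ hq))]
      have hlt : idx.toNat < sub.length := hr (t, idx) List.mem_cons_self
      rw [List.getD_eq_getElem sub _ hlt, List.map_set]
      have hlt' : idx.toNat < (List.map (fun s => s.2.2) sub).length := by simp [hlt]
      have hx : (day, sub[idx.toNat].2.1, sub[idx.toNat].2.2).2.2
          = (List.map (fun s => s.2.2) sub)[idx.toNat]'hlt' := by simp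
      rw [hx, List.set_getElem_self]
    · simp [pvConsumeC, if_neg h]

theorem pvConsumeR_fst (v : Int) (rem : List (Int × Int)) (day : Int) :
    ∀ (sub : List (Int × Int × Int)), (pvConsumeR v rem sub day).1 = pvDropLe v rem := by
  induction rem with
  | nil => intro sub; rfl
  | cons q rest ih =>
    intro sub
    obtain ⟨t, idx⟩ := q
    by_cases h : t ≤ v
    · simp only [pvConsumeR, pvDropLe, if_pos h]; exact ih _
    · simp [pvConsumeR, pvDropLe, if_neg h]

theorem pvConsumeR_length (v : Int) (rem : List (Int × Int)) (day : Int) :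
    ∀ (sub : List (Int × Int × Int)), (pvConsumeR v rem sub day).2.length = sub.length := by
  induction rem with
  | nil => intro sub; rfl
  | cons q rest ih =>
    intro sub
    obtain ⟨t, idx⟩ := q
    by_cases h : t ≤ v
    · simp only [pvConsumeR, if_pos h]; rw [ih _, List.length_set]
    · simp [pvConsumeR, if_neg h]

theorem pvConsumeR_mapC (v : Int) (rem : List (Int × Int)) (day : Int) :
    ∀ (sub : List (Int × Int × Int)), (∀ q ∈ rem, q.2.toNat < sub.length) →
    (pvConsumeR v rem sub day).2.map (fun s => s.1) = sub.map (fun s => s.1) := by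
  induction rem with
  | nil => intro sub _; rfl
  | cons q rest ih =>
    intro sub hr
    obtain ⟨t, idx⟩ := q
    by_cases h : t ≤ v
    · simp only [pvConsumeR, if_pos h]
      rw [ih _ (fun q hq => by rw [List.length_set]; exact hr q (List.mem_cons_of_mem _ hq))]
      have hlt : idx.toNat < sub.length := hr (t, idx) List.mem_cons_self
      rw [List.getD_eq_getElem sub _ hlt, List.map_set]
      have hlt' : idx.toNat < (List.map (fun s => s.1) sub).length := by simp [hlt]
      have hx : (sub[idx.toNat].1, day, sub[idx.toNat].2.2).1
          = (List.map (fun s => s.1) sub)[idx.toNat]'hlt' := by simp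
      rw [hx, List.set_getElem_self]
    · simp [pvConsumeR, if_neg h]

theorem pvConsumeR_mapR (v : Int) (rem : List (Int × Int)) (day : Int) :
    ∀ (sub : List (Int × Int × Int)),
    (pvConsumeR v rem sub day).2.map (fun s => s.2.1) = (pvConsume1 v rem (sub.map (fun s => s.2.1)) day).2 := by
  induction rem with
  | nil => intro sub; rfl
  | cons q rest ih =>
    intro sub
    obtain ⟨t, idx⟩ := q
    by_cases h : t ≤ v
    · simp only [pvConsumeR, pvConsume1, if_pos h]
      rw [ih _, List.map_set]
    · simp [pvConsumeR, pvConsume1, if_neg h]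

theorem pvConsumeR_mapH (v : Int) (rem : List (Int × Int)) (day : Int) :
    ∀ (sub : List (Int × Int × Int)), (∀ q ∈ rem, q.2.toNat < sub.length) →
    (pvConsumeR v rem sub day).2.map (fun s => s.2.2) = sub.map (fun s => s.2.2) := by
  induction rem with
  | nil => intro sub _; rfl
  | cons q rest ih =>
    intro sub hr
    obtain ⟨t, idx⟩ := q
    by_cases h : t ≤ v
    · simp only [pvConsumeR, if_pos h]
      rw [ih _ (fun q hq => by rw [List.length_set]; exact hr q (List.mem_cons_of_mem _ hq))]
      have hlt : idx.toNat < sub.length := hr (t, idx) List.mem_cons_self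
      rw [List.getD_eq_getElem sub _ hlt, List.map_set]
      have hlt' : idx.toNat < (List.map (fun s => s.2.2) sub).length := by simp [hlt]
      have hx : (sub[idx.toNat].1, day, sub[idx.toNat].2.2).2.2
          = (List.map (fun s => s.2.2) sub)[idx.toNat]'hlt' := by simp
      rw [hx, List.set_getElem_self]
    · simp [pvConsumeR, if_neg h]

theorem pvConsumeH_fst (v : Int) (rem : List (Int × Int)) (day : Int) :
    ∀ (sub : List (Int × Int × Int)), (pvConsumeH v rem sub day).1 = pvDropLe v rem := by
  induction rem with
  | nil => intro sub; rfl
  | cons q rest ih =>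
    intro sub
    obtain ⟨t, idx⟩ := q
    by_cases h : t ≤ v
    · simp only [pvConsumeH, pvDropLe, if_pos h]; exact ih _
    · simp [pvConsumeH, pvDropLe, if_neg h]

theorem pvConsumeH_length (v : Int) (rem : List (Int × Int)) (day : Int) :
    ∀ (sub : List (Int × Int × Int)), (pvConsumeH v rem sub day).2.length = sub.length := by
  induction rem with
  | nil => intro sub; rfl
  | cons q rest ih =>
    intro sub
    obtain ⟨t, idx⟩ := q
    by_cases h : t ≤ v
    · simp only [pvConsumeH, if_pos h]; rw [ih _, List.length_set]
    · simp [pvConsumeH, if_neg h]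

theorem pvConsumeH_mapC (v : Int) (rem : List (Int × Int)) (day : Int) :
    ∀ (sub : List (Int × Int × Int)), (∀ q ∈ rem, q.2.toNat < sub.length) →
    (pvConsumeH v rem sub day).2.map (fun s => s.1) = sub.map (fun s => s.1) := by
  induction rem with
  | nil => intro sub _; rfl
  | cons q rest ih =>
    intro sub hr
    obtain ⟨t, idx⟩ := q
    by_cases h : t ≤ v
    · simp only [pvConsumeH, if_pos h]
      rw [ih _ (fun q hq => by rw [List.length_set]; exact hr q (List.mem_cons_of_mem _ hq))]
      have hlt : idx.toNat < sub.length := hr (t, idx) List.mem_cons_self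
      rw [List.getD_eq_getElem sub _ hlt, List.map_set]
      have hlt' : idx.toNat < (List.map (fun s => s.1) sub).length := by simp [hlt]
      have hx : (sub[idx.toNat].1, sub[idx.toNat].2.1, day).1
          = (List.map (fun s => s.1) sub)[idx.toNat]'hlt' := by simp
      rw [hx, List.set_getElem_self]
    · simp [pvConsumeH, if_neg h]

theorem pvConsumeH_mapR (v : Int) (rem : List (Int × Int)) (day : Int) :
    ∀ (sub : List (Int × Int × Int)), (∀ q ∈ rem, q.2.toNat < sub.length) →
    (pvConsumeH v rem sub day).2.map (fun s => s.2.1) = sub.map (fun s => s.2.1) := by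
  induction rem with
  | nil => intro sub _; rfl
  | cons q rest ih =>
    intro sub hr
    obtain ⟨t, idx⟩ := q
    by_cases h : t ≤ v
    · simp only [pvConsumeH, if_pos h]
      rw [ih _ (fun q hq => by rw [List.length_set]; exact hr q (List.mem_cons_of_mem _ hq))]
      have hlt : idx.toNat < sub.length := hr (t, idx) List.mem_cons_self
      rw [List.getD_eq_getElem sub _ hlt, List.map_set]
      have hlt' : idx.toNat < (List.map (fun s => s.2.1) sub).length := by simp [hlt]
      have hx : (sub[idx.toNat].1, sub[idx.toNat].2.1, day).2.1
          = (List.map (fun s => s.2.1) sub)[idx.toNat]'hlt' := by simp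
      rw [hx, List.set_getElem_self]
    · simp [pvConsumeH, if_neg h]

theorem pvConsumeH_mapH (v : Int) (rem : List (Int × Int)) (day : Int) :
    ∀ (sub : List (Int × Int × Int)),
    (pvConsumeH v rem sub day).2.map (fun s => s.2.2) = (pvConsume1 v rem (sub.map (fun s => s.2.2)) day).2 := by
  induction rem with
  | nil => intro sub; rfl
  | cons q rest ih =>
    intro sub
    obtain ⟨t, idx⟩ := q
    by_cases h : t ≤ v
    · simp only [pvConsumeH, pvConsume1, if_pos h]
      rw [ih _, List.map_set]
    · simp [pvConsumeH, pvConsume1, if_neg h]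

theorem pvSweep_mapC (tot : List (Int × Int × Int)) :
    ∀ (day : Int) (cs rs hs : List (Int × Int)) (sub : List (Int × Int × Int)),
    (∀ q ∈ cs, q.2.toNat < sub.length) → (∀ q ∈ rs, q.2.toNat < sub.length) →
    (∀ q ∈ hs, q.2.toNat < sub.length) →
    (pvSweep tot day cs rs hs sub).map (fun s => s.1) =
      pvSweep1 (tot.map (fun s => s.1)) day cs (sub.map (fun s => s.1)) := by
  induction tot with
  | nil => intro day cs rs hs sub _ _ _; rfl
  | cons v rest ih =>
    intro day cs rs hs sub hcs hrs hhs
    have l1 := pvConsumeC_length v.1 cs day sub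
    have l2 := pvConsumeR_length v.2.1 rs day (pvConsumeC v.1 cs sub day).2
    have l3 := pvConsumeH_length v.2.2 hs day (pvConsumeR v.2.1 rs (pvConsumeC v.1 cs sub day).2 day).2
    have hcs1 : ∀ q ∈ cs, q.2.toNat < (pvConsumeC v.1 cs sub day).2.length := by
      rw [l1]; exact hcs
    have hrs1 : ∀ q ∈ rs, q.2.toNat < (pvConsumeC v.1 cs sub day).2.length := by
      rw [l1]; exact hrs
    have hhs2 : ∀ q ∈ hs, q.2.toNat < (pvConsumeR v.2.1 rs (pvConsumeC v.1 cs sub day).2 day).2.length := by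
      rw [l2, l1]; exact hhs
    have hcs2 : ∀ q ∈ cs, q.2.toNat < (pvConsumeR v.2.1 rs (pvConsumeC v.1 cs sub day).2 day).2.length := by
      rw [l2, l1]; exact hcs
    have hcs' : ∀ q ∈ (pvConsumeC v.1 cs sub day).1, q.2.toNat < (pvConsumeH v.2.2 hs (pvConsumeR v.2.1 rs (pvConsumeC v.1 cs sub day).2 day).2 day).2.length := by
      rw [pvConsumeC_fst, l3, l2, l1]; exact fun q hq => hcs q (pvDropLe_subset _ _ q hq)
    have hrs' : ∀ q ∈ (pvConsumeR v.2.1 rs (pvConsumeC v.1 cs sub day).2 day).1, q.2.toNat < (pvConsumeH v.2.2 hs (pvConsumeR v.2.1 rs (pvConsumeC v.1 cs sub day).2 day).2 day).2.length := by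
      rw [pvConsumeR_fst, l3, l2, l1]; exact fun q hq => hrs q (pvDropLe_subset _ _ q hq)
    have hhs' : ∀ q ∈ (pvConsumeH v.2.2 hs (pvConsumeR v.2.1 rs (pvConsumeC v.1 cs sub day).2 day).2 day).1, q.2.toNat < (pvConsumeH v.2.2 hs (pvConsumeR v.2.1 rs (pvConsumeC v.1 cs sub day).2 day).2 day).2.length := by
      rw [pvConsumeH_fst, l3, l2, l1]; exact fun q hq => hhs q (pvDropLe_subset _ _ q hq)
    simp only [pvSweep, List.map_cons, pvSweep1]
    rw [ih _ _ _ _ _ hcs' hrs' hhs']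
    rw [pvConsumeC_fst, pvConsume1_fst, pvConsumeH_mapC _ _ _ _ hhs2, pvConsumeR_mapC _ _ _ _ hrs1, pvConsumeC_mapC]

theorem pvSweep_mapR (tot : List (Int × Int × Int)) :
    ∀ (day : Int) (cs rs hs : List (Int × Int)) (sub : List (Int × Int × Int)),
    (∀ q ∈ cs, q.2.toNat < sub.length) → (∀ q ∈ rs, q.2.toNat < sub.length) →
    (∀ q ∈ hs, q.2.toNat < sub.length) →
    (pvSweep tot day cs rs hs sub).map (fun s => s.2.1) =
      pvSweep1 (tot.map (fun s => s.2.1)) day rs (sub.map (fun s => s.2.1)) := by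
  induction tot with
  | nil => intro day cs rs hs sub _ _ _; rfl
  | cons v rest ih =>
    intro day cs rs hs sub hcs hrs hhs
    have l1 := pvConsumeC_length v.1 cs day sub
    have l2 := pvConsumeR_length v.2.1 rs day (pvConsumeC v.1 cs sub day).2
    have l3 := pvConsumeH_length v.2.2 hs day (pvConsumeR v.2.1 rs (pvConsumeC v.1 cs sub day).2 day).2
    have hcs1 : ∀ q ∈ cs, q.2.toNat < (pvConsumeC v.1 cs sub day).2.length := by
      rw [l1]; exact hcs
    have hrs1 : ∀ q ∈ rs, q.2.toNat < (pvConsumeC v.1 cs sub day).2.length := by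
      rw [l1]; exact hrs
    have hhs2 : ∀ q ∈ hs, q.2.toNat < (pvConsumeR v.2.1 rs (pvConsumeC v.1 cs sub day).2 day).2.length := by
      rw [l2, l1]; exact hhs
    have hcs2 : ∀ q ∈ cs, q.2.toNat < (pvConsumeR v.2.1 rs (pvConsumeC v.1 cs sub day).2 day).2.length := by
      rw [l2, l1]; exact hcs
    have hcs' : ∀ q ∈ (pvConsumeC v.1 cs sub day).1, q.2.toNat < (pvConsumeH v.2.2 hs (pvConsumeR v.2.1 rs (pvConsumeC v.1 cs sub day).2 day).2 day).2.length := by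
      rw [pvConsumeC_fst, l3, l2, l1]; exact fun q hq => hcs q (pvDropLe_subset _ _ q hq)
    have hrs' : ∀ q ∈ (pvConsumeR v.2.1 rs (pvConsumeC v.1 cs sub day).2 day).1, q.2.toNat < (pvConsumeH v.2.2 hs (pvConsumeR v.2.1 rs (pvConsumeC v.1 cs sub day).2 day).2 day).2.length := by
      rw [pvConsumeR_fst, l3, l2, l1]; exact fun q hq => hrs q (pvDropLe_subset _ _ q hq)
    have hhs' : ∀ q ∈ (pvConsumeH v.2.2 hs (pvConsumeR v.2.1 rs (pvConsumeC v.1 cs sub day).2 day).2 day).1, q.2.toNat < (pvConsumeH v.2.2 hs (pvConsumeR v.2.1 rs (pvConsumeC v.1 cs sub day).2 day).2 day).2.length := by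
      rw [pvConsumeH_fst, l3, l2, l1]; exact fun q hq => hhs q (pvDropLe_subset _ _ q hq)
    simp only [pvSweep, List.map_cons, pvSweep1]
    rw [ih _ _ _ _ _ hcs' hrs' hhs']
    rw [pvConsumeR_fst, pvConsume1_fst, pvConsumeH_mapR _ _ _ _ hhs2, pvConsumeR_mapR, pvConsumeC_mapR _ _ _ _ hcs]

theorem pvSweep_mapH (tot : List (Int × Int × Int)) :
    ∀ (day : Int) (cs rs hs : List (Int × Int)) (sub : List (Int × Int × Int)),
    (∀ q ∈ cs, q.2.toNat < sub.length) → (∀ q ∈ rs, q.2.toNat < sub.length) →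
    (∀ q ∈ hs, q.2.toNat < sub.length) →
    (pvSweep tot day cs rs hs sub).map (fun s => s.2.2) =
      pvSweep1 (tot.map (fun s => s.2.2)) day hs (sub.map (fun s => s.2.2)) := by
  induction tot with
  | nil => intro day cs rs hs sub _ _ _; rfl
  | cons v rest ih =>
    intro day cs rs hs sub hcs hrs hhs
    have l1 := pvConsumeC_length v.1 cs day sub
    have l2 := pvConsumeR_length v.2.1 rs day (pvConsumeC v.1 cs sub day).2
    have l3 := pvConsumeH_length v.2.2 hs day (pvConsumeR v.2.1 rs (pvConsumeC v.1 cs sub day).2 day).2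
    have hcs1 : ∀ q ∈ cs, q.2.toNat < (pvConsumeC v.1 cs sub day).2.length := by
      rw [l1]; exact hcs
    have hrs1 : ∀ q ∈ rs, q.2.toNat < (pvConsumeC v.1 cs sub day).2.length := by
      rw [l1]; exact hrs
    have hhs2 : ∀ q ∈ hs, q.2.toNat < (pvConsumeR v.2.1 rs (pvConsumeC v.1 cs sub day).2 day).2.length := by
      rw [l2, l1]; exact hhs
    have hcs2 : ∀ q ∈ cs, q.2.toNat < (pvConsumeR v.2.1 rs (pvConsumeC v.1 cs sub day).2 day).2.length := by
      rw [l2, l1]; exact hcs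
    have hcs' : ∀ q ∈ (pvConsumeC v.1 cs sub day).1, q.2.toNat < (pvConsumeH v.2.2 hs (pvConsumeR v.2.1 rs (pvConsumeC v.1 cs sub day).2 day).2 day).2.length := by
      rw [pvConsumeC_fst, l3, l2, l1]; exact fun q hq => hcs q (pvDropLe_subset _ _ q hq)
    have hrs' : ∀ q ∈ (pvConsumeR v.2.1 rs (pvConsumeC v.1 cs sub day).2 day).1, q.2.toNat < (pvConsumeH v.2.2 hs (pvConsumeR v.2.1 rs (pvConsumeC v.1 cs sub day).2 day).2 day).2.length := by
      rw [pvConsumeR_fst, l3, l2, l1]; exact fun q hq => hrs q (pvDropLe_subset _ _ q hq)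
    have hhs' : ∀ q ∈ (pvConsumeH v.2.2 hs (pvConsumeR v.2.1 rs (pvConsumeC v.1 cs sub day).2 day).2 day).1, q.2.toNat < (pvConsumeH v.2.2 hs (pvConsumeR v.2.1 rs (pvConsumeC v.1 cs sub day).2 day).2 day).2.length := by
      rw [pvConsumeH_fst, l3, l2, l1]; exact fun q hq => hhs q (pvDropLe_subset _ _ q hq)
    simp only [pvSweep, List.map_cons, pvSweep1]
    rw [ih _ _ _ _ _ hcs' hrs' hhs']
    rw [pvConsumeH_fst, pvConsume1_fst, pvConsumeH_mapH, pvConsumeR_mapH _ _ _ _ hrs1, pvConsumeC_mapH _ _ _ _ hcs]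

theorem pvSweep_length (tot : List (Int × Int × Int)) :
    ∀ (day : Int) (cs rs hs : List (Int × Int)) (sub : List (Int × Int × Int)),
    (pvSweep tot day cs rs hs sub).length = sub.length := by
  induction tot with
  | nil => intro _ _ _ _ _; rfl
  | cons v rest ih =>
    intro day cs rs hs sub
    simp only [pvSweep]
    rw [ih, pvConsumeH_length, pvConsumeR_length, pvConsumeC_length]

theorem pvS_pairwise (requirements : List (List Int)) (j : Int) :
    (PySem.List.sorted ((PySem.List.enumerate requirements 0).map (fun p => (pvG p.2 j, p.1))) (·.1) false).Pairwise (fun a b => a.1 ≤ b.1) := by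
  exact PySem.List.sorted_pairwise _ _

theorem pvS_nodup (requirements : List (List Int)) (j : Int) :
    ((PySem.List.sorted ((PySem.List.enumerate requirements 0).map (fun p => (pvG p.2 j, p.1))) (·.1) false).map (fun q => q.2)).Nodup := by
  have hperm := PySem.List.sorted_perm ((PySem.List.enumerate requirements 0).map (fun p => (pvG p.2 j, p.1))) (fun q : Int × Int => q.1) false
  have hnd : (((PySem.List.enumerate requirements 0).map (fun p => (pvG p.2 j, p.1))).map (fun q => q.2)).Nodup := by
    rw [List.map_map]
    have : ((fun q : Int × Int => q.2) ∘ fun p : Int × List Int => (pvG p.2 j, p.1)) = fun p : Int × List Int => p.1 := by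
      funext p; rfl
    rw [this, PySem.List.map_fst_enumerate]
    exact PySem.List.nodup_pyRange_one _ _
  exact ((hperm.map _).nodup_iff).mpr hnd

theorem pvS_mem_bounds (requirements : List (List Int)) (j : Int) :
    ∀ q ∈ PySem.List.sorted ((PySem.List.enumerate requirements 0).map (fun p => (pvG p.2 j, p.1))) (·.1) false,
      0 ≤ q.2 ∧ q.2.toNat < requirements.length := by
  intro q hq
  rw [PySem.List.mem_sorted] at hq
  obtain ⟨p, hp, rfl⟩ := List.mem_map.mp hq
  obtain ⟨k, hk, rfl⟩ := (PySem.List.mem_enumerate_iff _ _ _).mp hp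
  simp
  omega

theorem pvS_mem (requirements : List (List Int)) (j : Int) (k : Nat) (hk : k < requirements.length) :
    (pvG requirements[k] j, (k : Int)) ∈
      PySem.List.sorted ((PySem.List.enumerate requirements 0).map (fun p => (pvG p.2 j, p.1))) (·.1) false := by
  rw [PySem.List.mem_sorted]
  refine List.mem_map.mpr ⟨((k : Int), requirements[k]), (PySem.List.mem_enumerate_iff _ _ _).mpr ⟨k, hk, by simp⟩, rfl⟩

theorem pvSub_get (increase : List (List Int)) (requirements : List (List Int)) (k : Nat)
    (hk : k < requirements.length) :
    (pvSweep ((0, 0, 0) :: pvPrefixB increase 0 0 0) 0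
      (PySem.List.sorted ((PySem.List.enumerate requirements 0).map (fun p => (pvG p.2 0, p.1))) (·.1) false)
      (PySem.List.sorted ((PySem.List.enumerate requirements 0).map (fun p => (pvG p.2 1, p.1))) (·.1) false)
      (PySem.List.sorted ((PySem.List.enumerate requirements 0).map (fun p => (pvG p.2 2, p.1))) (·.1) false)
      (List.replicate requirements.length (-1, -1, -1)))[k]? =
    some (pvFirstI (((0, 0, 0) :: pvPrefixB increase 0 0 0).map (fun s => s.1)) (pvG requirements[k] 0) 0,
          pvFirstI (((0, 0, 0) :: pvPrefixB increase 0 0 0).map (fun s => s.2.1)) (pvG requirements[k] 1) 0,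
          pvFirstI (((0, 0, 0) :: pvPrefixB increase 0 0 0).map (fun s => s.2.2)) (pvG requirements[k] 2) 0) := by
  have hrange0 : ∀ q ∈ (PySem.List.sorted ((PySem.List.enumerate requirements 0).map (fun p => (pvG p.2 0, p.1))) (·.1) false), q.2.toNat < (List.replicate requirements.length ((-1 : Int), (-1 : Int), (-1 : Int))).length := by
    intro q hq; rw [List.length_replicate]; exact (pvS_mem_bounds requirements 0 q hq).2
  have hrange1 : ∀ q ∈ (PySem.List.sorted ((PySem.List.enumerate requirements 0).map (fun p => (pvG p.2 1, p.1))) (·.1) false), q.2.toNat < (List.replicate requirements.length ((-1 : Int), (-1 : Int), (-1 : Int))).length := by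
    intro q hq; rw [List.length_replicate]; exact (pvS_mem_bounds requirements 1 q hq).2
  have hrange2 : ∀ q ∈ (PySem.List.sorted ((PySem.List.enumerate requirements 0).map (fun p => (pvG p.2 2, p.1))) (·.1) false), q.2.toNat < (List.replicate requirements.length ((-1 : Int), (-1 : Int), (-1 : Int))).length := by
    intro q hq; rw [List.length_replicate]; exact (pvS_mem_bounds requirements 2 q hq).2
  have hlen : (pvSweep ((0, 0, 0) :: pvPrefixB increase 0 0 0) 0 (PySem.List.sorted ((PySem.List.enumerate requirements 0).map (fun p => (pvG p.2 0, p.1))) (·.1) false) (PySem.List.sorted ((PySem.List.enumerate requirements 0).map (fun p => (pvG p.2 1, p.1))) (·.1) false) (PySem.List.sorted ((PySem.List.enumerate requirements 0).map (fun p => (pvG p.2 2, p.1))) (·.1) false) (List.replicate requirements.length (-1, -1, -1))).length = requirements.length := by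
    rw [pvSweep_length, List.length_replicate]
  have hk' : k < (pvSweep ((0, 0, 0) :: pvPrefixB increase 0 0 0) 0 (PySem.List.sorted ((PySem.List.enumerate requirements 0).map (fun p => (pvG p.2 0, p.1))) (·.1) false) (PySem.List.sorted ((PySem.List.enumerate requirements 0).map (fun p => (pvG p.2 1, p.1))) (·.1) false) (PySem.List.sorted ((PySem.List.enumerate requirements 0).map (fun p => (pvG p.2 2, p.1))) (·.1) false) (List.replicate requirements.length (-1, -1, -1))).length := by
    omega
  have h0 : (pvSweep ((0, 0, 0) :: pvPrefixB increase 0 0 0) 0 (PySem.List.sorted ((PySem.List.enumerate requirements 0).map (fun p => (pvG p.2 0, p.1))) (·.1) false) (PySem.List.sorted ((PySem.List.enumerate requirements 0).map (fun p => (pvG p.2 1, p.1))) (·.1) false) (PySem.List.sorted ((PySem.List.enumerate requirements 0).map (fun p => (pvG p.2 2, p.1))) (·.1) false) (List.replicate requirements.length (-1, -1, -1)))[k]?.map (fun s => s.1) = some (pvFirstI (((0, 0, 0) :: pvPrefixB increase 0 0 0).map (fun s => s.1)) (pvG requirements[k] 0) 0) := by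
    rw [← List.getElem?_map]
    rw [pvSweep_mapC _ 0 _ _ _ _ hrange0 hrange1 hrange2]
    rw [List.map_replicate]
    have hspec := pvSweep1_spec (((0, 0, 0) :: pvPrefixB increase 0 0 0).map (fun s => s.1)) 0
      (PySem.List.sorted ((PySem.List.enumerate requirements 0).map (fun p => (pvG p.2 0, p.1))) (·.1) false) (List.replicate requirements.length (-1)) (le_refl 0)
      (pvS_pairwise requirements 0) (pvS_nodup requirements 0)
      (fun q hq => by rw [List.length_replicate]; exact (pvS_mem_bounds requirements 0 q hq).2)
      (fun q hq => (pvS_mem_bounds requirements 0 q hq).1)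
      (pvG requirements[k] 0, (k : Int)) (pvS_mem requirements 0 k hk)
    have hkk : ((pvG requirements[k] 0, (k : Int)).2).toNat = k := by simp
    rw [hkk] at hspec
    rw [hspec, List.getElem?_replicate, if_pos hk]
    by_cases hF : pvFirstI (((0, 0, 0) :: pvPrefixB increase 0 0 0).map (fun s => s.1)) (pvG requirements[k] 0) 0 = -1
    · rw [if_pos hF, hF]
    · rw [if_neg hF]
  have h1 : (pvSweep ((0, 0, 0) :: pvPrefixB increase 0 0 0) 0 (PySem.List.sorted ((PySem.List.enumerate requirements 0).map (fun p => (pvG p.2 0, p.1))) (·.1) false) (PySem.List.sorted ((PySem.List.enumerate requirements 0).map (fun p => (pvG p.2 1, p.1))) (·.1) false) (PySem.List.sorted ((PySem.List.enumerate requirements 0).map (fun p => (pvG p.2 2, p.1))) (·.1) false) (List.replicate requirements.length (-1, -1, -1)))[k]?.map (fun s => s.2.1) = some (pvFirstI (((0, 0, 0) :: pvPrefixB increase 0 0 0).map (fun s => s.2.1)) (pvG requirements[k] 1) 0) := by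
    rw [← List.getElem?_map]
    rw [pvSweep_mapR _ 0 _ _ _ _ hrange0 hrange1 hrange2]
    rw [List.map_replicate]
    have hspec := pvSweep1_spec (((0, 0, 0) :: pvPrefixB increase 0 0 0).map (fun s => s.2.1)) 0
      (PySem.List.sorted ((PySem.List.enumerate requirements 0).map (fun p => (pvG p.2 1, p.1))) (·.1) false) (List.replicate requirements.length (-1)) (le_refl 0)
      (pvS_pairwise requirements 1) (pvS_nodup requirements 1)
      (fun q hq => by rw [List.length_replicate]; exact (pvS_mem_bounds requirements 1 q hq).2)
      (fun q hq => (pvS_mem_bounds requirements 1 q hq).1)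
      (pvG requirements[k] 1, (k : Int)) (pvS_mem requirements 1 k hk)
    have hkk : ((pvG requirements[k] 1, (k : Int)).2).toNat = k := by simp
    rw [hkk] at hspec
    rw [hspec, List.getElem?_replicate, if_pos hk]
    by_cases hF : pvFirstI (((0, 0, 0) :: pvPrefixB increase 0 0 0).map (fun s => s.2.1)) (pvG requirements[k] 1) 0 = -1
    · rw [if_pos hF, hF]
    · rw [if_neg hF]
  have h2 : (pvSweep ((0, 0, 0) :: pvPrefixB increase 0 0 0) 0 (PySem.List.sorted ((PySem.List.enumerate requirements 0).map (fun p => (pvG p.2 0, p.1))) (·.1) false) (PySem.List.sorted ((PySem.List.enumerate requirements 0).map (fun p => (pvG p.2 1, p.1))) (·.1) false) (PySem.List.sorted ((PySem.List.enumerate requirements 0).map (fun p => (pvG p.2 2, p.1))) (·.1) false) (List.replicate requirements.length (-1, -1, -1)))[k]?.map (fun s => s.2.2) = some (pvFirstI (((0, 0, 0) :: pvPrefixB increase 0 0 0).map (fun s => s.2.2)) (pvG requirements[k] 2) 0) := by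
    rw [← List.getElem?_map]
    rw [pvSweep_mapH _ 0 _ _ _ _ hrange0 hrange1 hrange2]
    rw [List.map_replicate]
    have hspec := pvSweep1_spec (((0, 0, 0) :: pvPrefixB increase 0 0 0).map (fun s => s.2.2)) 0
      (PySem.List.sorted ((PySem.List.enumerate requirements 0).map (fun p => (pvG p.2 2, p.1))) (·.1) false) (List.replicate requirements.length (-1)) (le_refl 0)
      (pvS_pairwise requirements 2) (pvS_nodup requirements 2)
      (fun q hq => by rw [List.length_replicate]; exact (pvS_mem_bounds requirements 2 q hq).2)
      (fun q hq => (pvS_mem_bounds requirements 2 q hq).1)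
      (pvG requirements[k] 2, (k : Int)) (pvS_mem requirements 2 k hk)
    have hkk : ((pvG requirements[k] 2, (k : Int)).2).toNat = k := by simp
    rw [hkk] at hspec
    rw [hspec, List.getElem?_replicate, if_pos hk]
    by_cases hF : pvFirstI (((0, 0, 0) :: pvPrefixB increase 0 0 0).map (fun s => s.2.2)) (pvG requirements[k] 2) 0 = -1
    · rw [if_pos hF, hF]
    · rw [if_neg hF]
  rw [List.getElem?_eq_getElem hk'] at h0 h1 h2 ⊢
  simp only [Option.map_some, Option.some.injEq] at h0 h1 h2
  exact congrArg some (by rw [← h0, ← h1, ← h2])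

theorem pv_main : ∀ (increase : List (List Int)) (requirements : List (List Int)),
    getTriggerTime2 increase requirements = getTriggerTime2_alt increase requirements := by
  intro increase requirements
  simp only [getTriggerTime2, getTriggerTime2_alt]
  rw [pvTotalA_eq]
  apply List.ext_getElem
  · simp
  · intro k h1 h2
    simp only [List.getElem_map, List.getElem_range]
    have hk : k < requirements.length := by simpa using h2
    have hget := pvSub_get increase requirements k hk
    rw [List.getD_eq_getElem?_getD, hget, Option.getD_some]
    rw [pvFirst_map, pvFirst_map, pvFirst_map]

-- ===== VERDICT (by name: the statement is the Claim_ definition above) =====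
theorem getTriggerTime2_spec : Claim_equal_getTriggerTime2 := by
  intro increase requirements _ _
  unfold Spec_getTriggerTime2
  exact pv_main increase requirements
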